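-- pv_equiv track=rewrite | github.com/ValentinGlairot/Projet_Modulation_Demodulation | Code_python_livrable_4_Bloc_SINGAL.py | VerificationErreurs
-- ===== SOURCE A (Python) =====
-- def DecimalVersBinaire(n):
--     r=''
--     while n>0:
--         r+=(str(n%2))
--         n=n//2
--     while len(r)<8:
--         r+='0'
--     return r[::-1]
--
-- def VerificationErreurs(message):
--     matrice=[]
--     for mot in message:
--         for caractere in mot :
--             matrice.append((DecimalVersBinaire(ord(caractere))))
--     verificationErreurs=[]
--     for caractere in matrice:
--         resultat=0
--         for bit in caractere:
--             resultat+=int(bit)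
--         verificationErreurs.append(resultat%2)
--     for i in range(8):
--         resultat=0
--         for caractere in matrice:
--             resultat+=int(caractere[i])
--         verificationErreurs.append(resultat%2)
--     return verificationErreurs
-- ===== SOURCE B (Python) =====
-- def VerificationErreurs(message):
--     # One pass over the characters: row parity by a bit-twiddling fold of the
--     # code point, all 8 column parities at once with a single XOR accumulator.
--     codes = [ord(c) for mot in message for c in mot]
--     acc = 0
--     res = []
--     for n in codes:
--         p = n ^ (n >> 4)
--         p ^= p >> 2
--         p ^= p >> 1
--         res.append(p & 1)
--         acc ^= n
--     for i in range(8):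
--         res.append((acc >> (7 - i)) & 1)
--     return res
-- ===== Notes on version B (the rewrite author's own statement) =====
-- stated objective: faster
-- what changed: Replaces the binary-string matrix and the 8 nested column scans by one pass over the character codes: row parity via a xor-shift popcount trick on the code point, and all 8 column parities computed together with a single integer XOR accumulator whose bits are read off at the end.
import Mathlib
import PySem

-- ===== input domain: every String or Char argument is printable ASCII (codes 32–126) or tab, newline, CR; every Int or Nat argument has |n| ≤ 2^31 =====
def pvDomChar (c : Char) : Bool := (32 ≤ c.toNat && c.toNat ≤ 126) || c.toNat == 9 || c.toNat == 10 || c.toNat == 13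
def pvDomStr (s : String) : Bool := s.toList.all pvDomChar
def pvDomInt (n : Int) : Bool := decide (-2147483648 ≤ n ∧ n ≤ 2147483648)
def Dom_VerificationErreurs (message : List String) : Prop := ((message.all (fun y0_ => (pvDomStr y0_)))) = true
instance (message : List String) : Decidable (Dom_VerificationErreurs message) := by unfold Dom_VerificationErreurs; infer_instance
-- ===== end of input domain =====

-- B computes the same row/column parity bits in one pass over the character codes
-- (xor-shift popcount for rows, one XOR accumulator for all 8 columns),
-- without building any binary strings.

-- ===== PORT A =====
-- while n > 0: r += str(n % 2); n = n // 2   (fuel = n bounds the iteration count; loop exits when n = 0)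
def pvDvbLoop : Nat → List Char → Nat → List Char
  | n, r, fuel+1 => if n > 0 then pvDvbLoop (n / 2) (r ++ [if n % 2 == 1 then '1' else '0']) fuel else r
  | _, r, 0 => r

-- while len(r) < 8: r += '0'   (fuel = 8 bounds the iteration count)
def pvPadLoop : List Char → Nat → List Char
  | r, fuel+1 => if r.length < 8 then pvPadLoop (r ++ ['0']) fuel else r
  | r, 0 => r

-- DecimalVersBinaire(n) as a list of characters ('' built char by char, then reversed)
def pvDVB (n : Nat) : List Char := (pvPadLoop (pvDvbLoop n [] n) 8).reverse

-- int(bit); in A the bits are always '0' or '1'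
def pvBitInt (b : Char) : Int := if b == '1' then 1 else 0

def VerificationErreurs (message : List String) : List Int :=
  let matrice := message.foldl (fun m mot => mot.toList.foldl (fun m c => m ++ [pvDVB c.toNat]) m) []
  let v1 := matrice.foldl (fun v car => v ++ [(car.foldl (fun s b => s + pvBitInt b) 0) % 2]) []
  (PySem.List.pyRange 0 8 1).foldl (fun v i =>
    v ++ [(matrice.foldl
        (fun s car => s + (match PySem.List.pyGet? car i with | some b => pvBitInt b | none => 0)) 0) % 2]) v1
  -- caractere[i]: the `none` branch is unreachable (every row of `matrice` has length ≥ 8)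

-- ===== PORT B =====
-- parity of the low 8 bits by xor-shift folding
def pvParity8 (n : Nat) : Nat :=
  let p := n ^^^ (n >>> 4)
  let p := p ^^^ (p >>> 2)
  let p := p ^^^ (p >>> 1)
  p &&& 1

def VerificationErreurs_alt (message : List String) : List Int :=
  let codes := message.flatMap (fun mot => mot.toList.map (fun c => c.toNat))
  let st := codes.foldl (fun (st : List Int × Nat) n =>
    (st.1 ++ [(pvParity8 n : Int)], st.2 ^^^ n)) ([], 0)
  st.1 ++ (List.range 8).map (fun i => (((st.2 >>> (7 - i)) &&& 1 : Nat) : Int))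

-- ===== PRECONDITION & SPEC =====
def Spec_VerificationErreurs (message : List String) (out : List Int) : Prop := out = VerificationErreurs_alt message
instance (message : List String) (out : List Int) : Decidable (Spec_VerificationErreurs message out) := by unfold Spec_VerificationErreurs; infer_instance

-- ===== CLAIM (what is proved, stated in full; the proofs are below) =====
def Claim_equal_VerificationErreurs : Prop := ∀ (message : List String), Dom_VerificationErreurs message → Spec_VerificationErreurs message (VerificationErreurs message)

-- ===== LEMMAS AND PROOFS =====

-- the flattened list of character codes
def pvCodes (message : List String) : List Nat :=
  message.flatMap (fun mot => mot.toList.map (fun c => c.toNat))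

lemma pvCodes_lt (message : List String) (h : Dom_VerificationErreurs message) :
    ∀ n ∈ pvCodes message, n < 128 := by
  intro n hn
  simp only [pvCodes, List.mem_flatMap, List.mem_map] at hn
  obtain ⟨mot, hmot, c, hc, rfl⟩ := hn
  unfold Dom_VerificationErreurs at h
  rw [List.all_eq_true] at h
  have := h mot hmot
  unfold pvDomStr at this
  rw [List.all_eq_true] at this
  have := this c hc
  unfold pvDomChar at this
  simp only [Bool.or_eq_true, Bool.and_eq_true, decide_eq_true_eq, beq_iff_eq] at this
  omega

lemma matrice_eq (message : List String) (acc : List (List Char)) :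
    message.foldl (fun m mot => mot.toList.foldl (fun m c => m ++ [pvDVB c.toNat]) m) acc
      = acc ++ (pvCodes message).map pvDVB := by
  induction message generalizing acc with
  | nil => simp [pvCodes]
  | cons mot rest ih =>
    rw [List.foldl_cons, PySem.List.foldl_append_singleton_eq_map, ih]
    simp [pvCodes, List.map_map, Function.comp_def, List.append_assoc]

-- row parity of A's binary string equals B's xor-shift parity, for codes < 128
lemma row_eq : ∀ n < 128,
    ((pvDVB n).foldl (fun s b => s + pvBitInt b) 0) % 2 = (pvParity8 n : Int) := by decide

-- column bit of A's binary string equals bit (7 - i) of the code, for codes < 128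
lemma col_eq : ∀ i : Nat, i < 8 → ∀ n < 128,
    (match PySem.List.pyGet? (pvDVB n) (i : Int) with | some b => pvBitInt b | none => 0)
      = (((n >>> (7 - i)) &&& 1 : Nat) : Int) := by decide

lemma bit_eq (a k : Nat) : (a >>> k) &&& 1 = if a.testBit k then 1 else 0 := by
  simp only [Nat.and_one_is_mod, Nat.testBit_eq_decide_div_mod_eq, Nat.shiftRight_eq_div_pow]
  rcases Nat.mod_two_eq_zero_or_one (a / 2 ^ k) with h | h <;> simp [h]

lemma bit_xor (a b k : Nat) : ((a ^^^ b) >>> k) &&& 1 = (((a >>> k) &&& 1) + ((b >>> k) &&& 1)) % 2 := by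
  rw [bit_eq, bit_eq, bit_eq, Nat.testBit_xor]
  cases ha : a.testBit k <;> cases hb : b.testBit k <;> simp

-- bit k of the XOR-fold is the sum of bits k, mod 2
lemma xorfold_bit (k : Nat) (l : List Nat) (a : Nat) :
    ((l.foldl (· ^^^ ·) a) >>> k) &&& 1
      = (((a >>> k) &&& 1) + (l.map (fun n => (n >>> k) &&& 1)).sum) % 2 := by
  induction l generalizing a with
  | nil =>
    simp only [List.foldl_nil, List.map_nil, List.sum_nil, Nat.add_zero]
    rw [bit_eq]; split <;> simp
  | cons n t ih =>
    simp only [List.foldl_cons, List.map_cons, List.sum_cons]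
    rw [ih, bit_xor]
    omega

lemma sum_map_cast (l : List Nat) (f : Nat → Nat) :
    (l.map (fun n => ((f n : Nat) : Int))).sum = (((l.map f).sum : Nat) : Int) := by
  induction l with
  | nil => simp
  | cons x t ih => simp [ih]

-- the column value A computes at index i equals bit (7-i) of B's accumulator
lemma column_value (codes : List Nat) (hc : ∀ n ∈ codes, n < 128) (i : Nat) (hi : i < 8) :
    ((codes.map pvDVB).foldl
        (fun (s : Int) car => s + (match PySem.List.pyGet? car ((i : Nat) : Int) with | some b => pvBitInt b | none => 0)) 0) % 2
      = ((((codes.foldl (· ^^^ ·) 0) >>> (7 - i)) &&& 1 : Nat) : Int) := by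
  rw [PySem.List.foldl_add (g := fun car =>
      (match PySem.List.pyGet? car ((i : Nat) : Int) with | some b => pvBitInt b | none => 0))]
  rw [List.map_map]
  have hmap : (codes.map (fun n =>
      (match PySem.List.pyGet? (pvDVB n) ((i : Nat) : Int) with | some b => pvBitInt b | none => 0)))
      = codes.map (fun n => (((n >>> (7 - i)) &&& 1 : Nat) : Int)) := by
    apply List.map_congr_left
    intro n hn
    exact col_eq i hi n (hc n hn)
  simp only [Function.comp_def, hmap, sum_map_cast, Int.zero_add]
  rw [xorfold_bit (7 - i) codes 0]
  have h0 : ((0 : Nat) >>> (7 - i)) &&& 1 = 0 := by simp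
  rw [h0, Nat.zero_add]
  push_cast
  rfl

lemma pyRange8 : PySem.List.pyRange 0 8 1 = (List.range 8).map (fun i => ((i : Nat) : Int)) := by
  decide

-- ===== VERDICT (by name: the statement is the Claim_ definition above) =====
theorem VerificationErreurs_spec : Claim_equal_VerificationErreurs := by
  intro message hDom
  have hc := pvCodes_lt message hDom
  unfold Spec_VerificationErreurs VerificationErreurs VerificationErreurs_alt
  dsimp only
  rw [show (message.flatMap (fun mot => mot.toList.map (fun c => c.toNat))) = pvCodes message from rfl]
  rw [matrice_eq message [], List.nil_append]
  rw [PySem.List.foldl_prod_mk (f := fun s e => s ++ [(pvParity8 e : Int)]) (g := fun s e => s ^^^ e)]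
  simp only [PySem.List.foldl_append_singleton_eq_map, List.nil_append, List.map_map]
  -- rows agree
  have hrows : (pvCodes message).map (fun n =>
      ((pvDVB n).foldl (fun s b => s + pvBitInt b) 0) % 2)
      = (pvCodes message).map (fun n => (pvParity8 n : Int)) := by
    apply List.map_congr_left
    intro n hn
    exact row_eq n (hc n hn)
  rw [Function.comp_def, hrows]
  -- columns agree
  congr 1
  rw [pyRange8, List.map_map]
  apply List.map_congr_left
  intro i hi
  rw [List.mem_range] at hi
  exact column_value (pvCodes message) hc i hi
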